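-- pv_equiv track=rewrite | github.com/spencerchiang301/Flask-Backend | Utility/MyTiime.py | getSecond
-- ===== SOURCE A (Python) =====
-- def getSecond(number):
--     second = ""
--     sList1 = ["01", "02", "03", "04", "05", "06", "07", "08", "09", "10",
--               "11", "12", "13", "14", "15", "16", "17", "18", "19", "20",
--               "21", "22", "23", "24", "25", "26", "27", "28", "29", "30",
--               "31", "32", "33", "34", "35", "36", "37", "38", "39", "40",
--               "41", "42", "43", "44", "45", "46", "47", "48", "49", "50",
--               "51", "52", "53", "54", "55", "56", "57", "58", "59"]
--
--     sList2 = ["一秒", "二秒", "三秒", "四秒", "五秒", "六秒", "七秒", "八秒", "九秒", "十秒",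
--               "十一秒", "十二秒", "十三秒", "十四秒", "十五秒", "十六秒", "十七秒", "十八秒", "十九秒", "二十秒",
--               "二十一秒", "二十二秒", "二十三秒", "二十四秒", "二十五秒", "二十六秒", "二十七秒", "二十八秒",
--               "二十九秒", "三十秒", "三十一秒", "三十二秒", "三十三秒", "三十四秒", "三十五秒", "三十六秒",
--               "三十七秒", "三十八秒", "三十九秒", "四十秒", "四十一秒", "四十二秒", "四十三秒", "四十四秒",
--               "四十五秒", "四十六秒", "四十七秒", "四十八秒", "四十九秒", "五十秒", "五十一秒", "五十二秒",
--               "五十三秒", "五十四秒", "五十五秒", "五十六秒", "五十七秒", "五十八秒", "五十九秒"]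
--
--     for i in range(len(sList1)):
--         if number == sList1[i]:
--             second = sList2[i]
--             break
--
--     return second
-- ===== SOURCE B (Python) =====
-- def getSecond(number):
--     # closed-form Chinese numeral construction instead of two parallel 59-entry tables
--     if not isinstance(number, str) or len(number) != 2:
--         return ""
--     c0, c1 = number
--     if not ('0' <= c0 <= '9' and '0' <= c1 <= '9'):
--         return ""
--     n = (ord(c0) - 48) * 10 + (ord(c1) - 48)
--     if n < 1 or n > 59:
--         return ""
--     units = ["", "一", "二", "三", "四", "五", "六", "七", "八", "九"]
--     t, u = divmod(n, 10)
--     if t == 0: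
--         body = units[u]
--     elif t == 1:
--         body = "十" + units[u]
--     else:
--         body = units[t] + "十" + units[u]
--     return body + "秒"
-- ===== Notes on version B (the rewrite author's own statement) =====
-- stated objective: simpler
-- what changed: Replaces the two parallel 59-entry lookup tables and the linear scan with a guard that accepts exactly the two-ASCII-digit strings 01..59 plus a closed-form construction of the Chinese numeral from units digits, tens and the unit word.
import Mathlib
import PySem

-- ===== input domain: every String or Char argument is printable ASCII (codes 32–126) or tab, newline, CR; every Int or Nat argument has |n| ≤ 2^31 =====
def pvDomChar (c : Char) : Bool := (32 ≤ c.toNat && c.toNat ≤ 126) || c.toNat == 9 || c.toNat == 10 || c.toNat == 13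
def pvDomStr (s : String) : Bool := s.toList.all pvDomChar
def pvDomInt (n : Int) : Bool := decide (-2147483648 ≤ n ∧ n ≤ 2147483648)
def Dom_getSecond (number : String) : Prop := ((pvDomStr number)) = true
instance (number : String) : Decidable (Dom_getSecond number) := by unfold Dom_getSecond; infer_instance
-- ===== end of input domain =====

-- B replaces A's two parallel 59-entry tables and linear scan with a digit guard plus a closed-form numeral construction (simpler).


-- ===== PORT A =====
def sList1A : List String :=
  ["01", "02", "03", "04", "05", "06", "07", "08", "09", "10",
   "11", "12", "13", "14", "15", "16", "17", "18", "19", "20",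
   "21", "22", "23", "24", "25", "26", "27", "28", "29", "30",
   "31", "32", "33", "34", "35", "36", "37", "38", "39", "40",
   "41", "42", "43", "44", "45", "46", "47", "48", "49", "50",
   "51", "52", "53", "54", "55", "56", "57", "58", "59"]

def sList2A : List String :=
  ["一秒", "二秒", "三秒", "四秒", "五秒", "六秒", "七秒", "八秒", "九秒", "十秒",
   "十一秒", "十二秒", "十三秒", "十四秒", "十五秒", "十六秒", "十七秒", "十八秒", "十九秒", "二十秒",
   "二十一秒", "二十二秒", "二十三秒", "二十四秒", "二十五秒", "二十六秒", "二十七秒", "二十八秒",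
   "二十九秒", "三十秒", "三十一秒", "三十二秒", "三十三秒", "三十四秒", "三十五秒", "三十六秒",
   "三十七秒", "三十八秒", "三十九秒", "四十秒", "四十一秒", "四十二秒", "四十三秒", "四十四秒",
   "四十五秒", "四十六秒", "四十七秒", "四十八秒", "四十九秒", "五十秒", "五十一秒", "五十二秒",
   "五十三秒", "五十四秒", "五十五秒", "五十六秒", "五十七秒", "五十八秒", "五十九秒"]

-- the for-loop with break: walk both lists in step, return the paired value on first match, else "" (the untouched `second`)
def loopA (number : String) : List String → List String → String
  | x :: xs, y :: ys => if number = x then y else loopA number xs ys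
  | _, _ => ""

def getSecond (number : String) : String := loopA number sList1A sList2A

-- ===== PORT B =====
def unitsB : List String := ["", "一", "二", "三", "四", "五", "六", "七", "八", "九"]

def getSecond_alt (number : String) : String :=
  match number.toList with
  | [c0, c1] =>
    if '0' ≤ c0 ∧ c0 ≤ '9' ∧ '0' ≤ c1 ∧ c1 ≤ '9' then
      let n : Nat := (c0.toNat - 48) * 10 + (c1.toNat - 48)
      if n < 1 ∨ 59 < n then ""
      else
        let t := n / 10
        let u := n % 10
        let body :=
          if t = 0 then unitsB.getD u ""
          else if t = 1 then "十" ++ unitsB.getD u ""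
          else unitsB.getD t "" ++ "十" ++ unitsB.getD u ""
        body ++ "秒"
    else ""
  | _ => ""

-- ===== PRECONDITION & SPEC =====
def Spec_getSecond (number : String) (out : String) : Prop := out = getSecond_alt number
instance (number : String) (out : String) : Decidable (Spec_getSecond number out) := by unfold Spec_getSecond; infer_instance

-- ===== CLAIM (what is proved, stated in full; the proofs are below) =====
def Claim_equal_getSecond : Prop := ∀ (number : String), Dom_getSecond number → Spec_getSecond number (getSecond number)

-- ===== LEMMAS AND PROOFS =====

def digitChars : List Char := ['0', '1', '2', '3', '4', '5', '6', '7', '8', '9']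

-- a char between '0' and '9' is one of the ten digit characters
lemma mem_digitChars {c : Char} (h0 : '0' ≤ c) (h9 : c ≤ '9') : c ∈ digitChars := by
  have h1 : 48 ≤ c.toNat := h0
  have h2 : c.toNat ≤ 57 := h9
  have hc : c = Char.ofNat c.toNat := (Char.ofNat_toNat c).symm
  interval_cases h : c.toNat <;> rw [hc] <;> decide

-- if number matches no key, the loop returns the untouched ""
lemma loopA_eq_empty {number : String} :
    ∀ (xs ys : List String), number ∉ xs → loopA number xs ys = "" := by
  intro xs
  induction xs with
  | nil => intro ys _; cases ys <;> rfl
  | cons x xs ih =>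
    intro ys hn
    cases ys with
    | nil => rfl
    | cons y ys =>
      simp only [loopA]
      rw [if_neg (by simp at hn; exact hn.1), ih ys (by simp at hn; exact hn.2)]

-- every key of A's table is a string of exactly two digit characters
lemma sList1A_shape : ∀ s ∈ sList1A,
    s.toList.length = 2 ∧ ∀ c ∈ s.toList, '0' ≤ c ∧ c ≤ '9' := by
  intro s hs
  fin_cases hs <;> simp

-- the two ports agree on every string of two digit characters (in range 01..59 or not)
lemma both_on_digits : ∀ c0 c1 : Char, c0 ∈ digitChars → c1 ∈ digitChars →
    getSecond (String.ofList [c0, c1]) = getSecond_alt (String.ofList [c0, c1]) := by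
  intro c0 c1 h0 h1
  fin_cases h0 <;> fin_cases h1 <;> rfl

theorem getSecond_spec_aux (number : String) :
    getSecond number = getSecond_alt number := by
  rcases h : number.toList with _ | ⟨c0, _ | ⟨c1, _ | ⟨c2, rest⟩⟩⟩
  · have hnm : number ∉ sList1A := by
      intro hm
      have hsh := (sList1A_shape number hm).1
      rw [h] at hsh; simp at hsh
    rw [show getSecond number = "" from loopA_eq_empty _ _ hnm]
    simp [getSecond_alt, h]
  · have hnm : number ∉ sList1A := by
      intro hm
      have hsh := (sList1A_shape number hm).1
      rw [h] at hsh; simp at hsh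
    rw [show getSecond number = "" from loopA_eq_empty _ _ hnm]
    simp [getSecond_alt, h]
  · by_cases hd : '0' ≤ c0 ∧ c0 ≤ '9' ∧ '0' ≤ c1 ∧ c1 ≤ '9'
    · have hn : number = String.ofList [c0, c1] := by rw [← h, String.ofList_toList]
      rw [hn]
      exact both_on_digits c0 c1 (mem_digitChars hd.1 hd.2.1)
        (mem_digitChars hd.2.2.1 hd.2.2.2)
    · have hnm : number ∉ sList1A := by
        intro hm
        have hsh := (sList1A_shape number hm).2
        rw [h] at hsh
        exact hd ⟨(hsh c0 (by simp)).1, (hsh c0 (by simp)).2,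
          (hsh c1 (by simp)).1, (hsh c1 (by simp)).2⟩
      rw [show getSecond number = "" from loopA_eq_empty _ _ hnm]
      simp [getSecond_alt, h, hd]
  · have hnm : number ∉ sList1A := by
      intro hm
      have hsh := (sList1A_shape number hm).1
      rw [h] at hsh; simp at hsh
    rw [show getSecond number = "" from loopA_eq_empty _ _ hnm]
    simp [getSecond_alt, h]

-- ===== VERDICT (by name: the statement is the Claim_ definition above) =====
theorem getSecond_spec : Claim_equal_getSecond := by
  intro number _
  exact getSecond_spec_aux number
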